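-- pv_equiv track=rewrite | github.com/necarlson97/psycho-dice-namic | src/emotions_runtime.py | _camel_to_title
-- ===== SOURCE A (Python) =====
-- def _camel_to_title(name: str) -> str:
--     out = []
--     prev_lower = False
--     for ch in name:
--         if ch.isupper() and prev_lower:
--             out.append(' ')
--         out.append(ch)
--         prev_lower = ch.islower()
--     return ''.join(out)
-- ===== SOURCE B (Python) =====
-- def _camel_to_title(name: str) -> str:
--     cuts = [i for i in range(1, len(name))
--             if name[i].isupper() and name[i - 1].islower()]
--     pieces = []
--     prev = 0
--     for c in cuts:
--         pieces.append(name[prev:c])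
--         prev = c
--     pieces.append(name[prev:])
--     return ' '.join(pieces)
-- ===== Notes on version B (the rewrite author's own statement) =====
-- stated objective: alternative
-- what changed: B first builds the list of lower-to-upper boundary indices, then slices the string at those cut points and joins the pieces with a single space, replacing A's single stateful character scan carrying prev_lower.
import Mathlib
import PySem

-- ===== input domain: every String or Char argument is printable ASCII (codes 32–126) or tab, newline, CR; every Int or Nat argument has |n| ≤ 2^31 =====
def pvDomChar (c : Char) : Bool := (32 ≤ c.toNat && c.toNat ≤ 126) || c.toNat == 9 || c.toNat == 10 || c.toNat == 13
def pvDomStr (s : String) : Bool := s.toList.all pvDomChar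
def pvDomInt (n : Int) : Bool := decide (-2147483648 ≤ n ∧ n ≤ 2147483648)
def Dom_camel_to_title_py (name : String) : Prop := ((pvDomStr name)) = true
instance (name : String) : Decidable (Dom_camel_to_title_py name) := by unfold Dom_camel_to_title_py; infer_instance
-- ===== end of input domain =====

-- B inserts the spaces by a two-pass cut-index/slice-and-join decomposition instead of A's
-- single stateful scan; same cost, alternative structure.

-- ===== PORT A =====
-- one loop step of A: append ' ' before an upper-case char that follows a lower-case one
def stepA (st : List Char × Bool) (ch : Char) : List Char × Bool :=
  ((if PySem.Chars.isupper ch && st.2 then st.1 ++ [' '] else st.1) ++ [ch],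
   PySem.Chars.islower ch)

def camel_to_title_py (name : String) : String :=
  String.ofList (name.toList.foldl stepA ([], false)).1

-- ===== PORT B =====
-- one loop step of B: slice off the piece from the previous cut to the next cut
def stepB (s : List Char) (st : List (List Char) × Int) (c : Int) : List (List Char) × Int :=
  (st.1 ++ [PySem.List.slice s (some st.2) (some c)], c)

def camel_to_title_py_alt (name : String) : String :=
  let s := name.toList
  let cuts : List Int := (PySem.List.pyRange 1 (s.length : Int)).filter
    (fun i => PySem.Chars.isupper (PySem.List.pyGetD s i ' ') &&
              PySem.Chars.islower (PySem.List.pyGetD s (i - 1) ' '))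
  let st := cuts.foldl (stepB s) ([], 0)
  let pieces := st.1 ++ [PySem.List.slice s (some st.2) none]
  String.ofList (PySem.Chars.join [' '] pieces)

-- ===== PRECONDITION & SPEC =====
def Spec_camel_to_title_py (name : String) (out : String) : Prop := out = camel_to_title_py_alt name
instance (name : String) (out : String) : Decidable (Spec_camel_to_title_py name out) := by unfold Spec_camel_to_title_py; infer_instance

-- ===== CLAIM (what is proved, stated in full; the proofs are below) =====
def Claim_equal_camel_to_title_py : Prop := ∀ (name : String), Dom_camel_to_title_py name → Spec_camel_to_title_py name (camel_to_title_py name)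

-- ===== LEMMAS AND PROOFS =====

-- a lower→upper boundary sits at index k (k ≥ 1, s[k] upper, s[k-1] lower)
def bdry (s : List Char) (k : Nat) : Bool :=
  PySem.Chars.isupper (s.getD k ' ') && (decide (k ≠ 0) && PySem.Chars.islower (s.getD (k - 1) ' '))

-- the common index-based spec: the m chars of s starting at k, a space before each boundary
def eS (s : List Char) (k m : Nat) : List Char :=
  match m with
  | 0 => []
  | m + 1 => (if bdry s k then [' '] else []) ++ s.getD k ' ' :: eS s (k + 1) m

-- like eS but never a space before the FIRST char (a join emits that space itself)
def tS (s : List Char) (k m : Nat) : List Char :=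
  match m with
  | 0 => []
  | m + 1 => s.getD k ' ' :: eS s (k + 1) m

lemma eS_eq_tS (s : List Char) (k m : Nat) :
    eS s k (m + 1) = (if bdry s k then [' '] else []) ++ tS s k (m + 1) := by
  simp [eS, tS]

-- A's fold, started after k chars, emits exactly eS s k (n-k)
lemma A_fold (s : List Char) : ∀ (m k : Nat) (acc : List Char), k + m = s.length →
    ((s.drop k).foldl stepA
        (acc, decide (k ≠ 0) && PySem.Chars.islower (s.getD (k - 1) ' '))).1
      = acc ++ eS s k m := by
  intro m
  induction m with
  | zero =>
    intro k acc h
    have hd : s.drop k = [] := by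
      rw [List.drop_eq_nil_iff]; omega
    simp [hd, eS]
  | succ m ih =>
    intro k acc h
    have hk : k < s.length := by omega
    have hget : s.getD k ' ' = s[k] := List.getD_eq_getElem s ' ' hk
    rw [List.drop_eq_getElem_cons hk, List.foldl_cons]
    have h2 : (stepA (acc, decide (k ≠ 0) && PySem.Chars.islower (s.getD (k - 1) ' ')) s[k])
        = ((if bdry s k then acc ++ [' '] else acc) ++ [s[k]],
           decide (k + 1 ≠ 0) && PySem.Chars.islower (s.getD (k + 1 - 1) ' ') ) := by
      have hk1 : s[k]? = some s[k] := List.getElem?_eq_getElem hk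
      simp [stepA, bdry, hk1]
    rw [h2, ih (k + 1) _ (by omega)]
    simp only [eS, hget]
    by_cases hb : bdry s k = true <;> simp [hb]

-- pyRange with step 1 over Nat endpoints is a mapped List.range'
lemma pyRange_nil (a b : Int) (h : b ≤ a) : PySem.List.pyRange a b = [] := by
  simp only [PySem.List.pyRange]
  split
  · rfl
  · simp only [if_pos (by omega : (0:Int) < 1)]
    rw [if_neg (by omega)]
    rfl

lemma pyRange_natCast : ∀ (m a : Nat),
    PySem.List.pyRange (a : Int) ((a + m : Nat) : Int) = (List.range' a m).map (Nat.cast : Nat → Int) := by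
  intro m
  induction m with
  | zero =>
    intro a
    rw [pyRange_nil _ _ (by push_cast; omega)]
    simp
  | succ m ih =>
    intro a
    rw [PySem.List.pyRange_one_cons (by push_cast; omega)]
    have e1 : ((a : Int) + 1) = ((a + 1 : Nat) : Int) := by push_cast; ring
    have e2 : ((a + (m + 1) : Nat) : Int) = (((a + 1) + m : Nat) : Int) := by push_cast; ring
    rw [e1, e2, ih (a + 1)]
    simp [List.range'_succ]

lemma pyRange_one_len (n : Nat) :
    PySem.List.pyRange 1 (n : Int) = (List.range' 1 (n - 1)).map (Nat.cast : Nat → Int) := by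
  cases n with
  | zero => rw [pyRange_nil _ _ (by omega)]; simp
  | succ n =>
    have e : ((n + 1 : Nat) : Int) = ((1 + n : Nat) : Int) := by push_cast; ring
    rw [e]
    nth_rewrite 1 [show (1 : Int) = ((1 : Nat) : Int) from (Nat.cast_one).symm]
    rw [pyRange_natCast n 1]
    simp

-- the boundary indices B computes, on the Nat side
def cutsN (s : List Char) : List Nat := (List.range' 1 (s.length - 1)).filter (fun i => bdry s i)

lemma cuts_eq (s : List Char) :
    (PySem.List.pyRange 1 (s.length : Int)).filter
      (fun i => PySem.Chars.isupper (PySem.List.pyGetD s i ' ') &&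
                PySem.Chars.islower (PySem.List.pyGetD s (i - 1) ' '))
    = (cutsN s).map (Nat.cast : Nat → Int) := by
  have hfm := List.filter_map (f := (Nat.cast : Nat → Int))
    (p := fun i : Int => PySem.Chars.isupper (PySem.List.pyGetD s i ' ') &&
                         PySem.Chars.islower (PySem.List.pyGetD s (i - 1) ' '))
    (l := List.range' 1 (s.length - 1))
  rw [pyRange_one_len, hfm]
  unfold cutsN
  refine congrArg (List.map (Nat.cast : Nat → Int)) (List.filter_congr ?_)
  intro i hi
  have h1 : 1 ≤ i := (List.mem_range'_1.mp hi).1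
  have hne : i ≠ 0 := by omega
  have e : ((i : Int) - 1) = ((i - 1 : Nat) : Int) := by omega
  simp only [Function.comp_apply, e, PySem.List.pyGetD_natCast]
  simp [bdry, hne, Bool.and_comm]

-- B's slice fold, as a recursion over the cut list
def piecesRec (s : List Char) (prev : Nat) : List Nat → List (List Char)
  | [] => []
  | c :: t => PySem.List.slice s (some (prev : Int)) (some (c : Int)) :: piecesRec s c t

lemma B_fold (s : List Char) : ∀ (cs : List Nat) (ps : List (List Char)) (prev : Nat),
    (cs.map (Nat.cast : Nat → Int)).foldl (stepB s) (ps, (prev : Int))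
      = (ps ++ piecesRec s prev cs, ((cs.getLastD prev : Nat) : Int)) := by
  intro cs
  induction cs with
  | nil => intro ps prev; simp [piecesRec]
  | cons c t ih =>
    intro ps prev
    simp only [List.map_cons, List.foldl_cons, stepB]
    rw [ih (ps ++ [PySem.List.slice s (some (prev : Int)) (some (c : Int))]) c]
    simp only [piecesRec, List.append_assoc, List.singleton_append, Prod.mk.injEq]
    refine ⟨by trivial, ?_⟩
    cases t with
    | nil => simp
    | cons a t' =>
      simp only [List.getLastD_eq_getLast?, List.getLast?_cons_cons]
      congr 1

-- joined pieces, as a single recursion splicing ' ' at each cut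
def spliceAux (s : List Char) (prev : Nat) : List Nat → List Char
  | [] => s.drop prev
  | c :: t => List.take (c - prev) (s.drop prev) ++ ' ' :: spliceAux s c t

lemma join_pieces (s : List Char) : ∀ (cs : List Nat) (prev : Nat),
    PySem.Chars.join [' ']
        (piecesRec s prev cs ++ [PySem.List.slice s (some ((cs.getLastD prev : Nat) : Int)) none])
      = spliceAux s prev cs := by
  intro cs
  induction cs with
  | nil =>
    intro prev
    simp [piecesRec, spliceAux, PySem.Chars.join_singleton,
          PySem.List.slice_from s (by positivity : (0:Int) ≤ (prev : Int))]
  | cons c t ih =>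
    intro prev
    simp only [piecesRec, List.getLastD_cons, List.cons_append]
    obtain ⟨q, rest, hqr⟩ :
        ∃ q rest, piecesRec s c t ++ [PySem.List.slice s (some ((t.getLastD c : Nat) : Int)) none]
          = q :: rest := by
      cases piecesRec s c t <;> exact ⟨_, _, rfl⟩
    rw [hqr, PySem.Chars.join_cons_cons, ← hqr, ih c]
    rw [PySem.List.slice_toNat s (by positivity) (by positivity)]
    simp [spliceAux]

-- the splice at the exact boundary cuts IS the index-based spec (tail form)
lemma splice_peel (s : List Char) (k : Nat) (hk : k < s.length) (cs : List Nat)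
    (hcs : ∀ c ∈ cs, k < c) :
    spliceAux s k cs = s.getD k ' ' :: spliceAux s (k + 1) cs := by
  have hget : s.getD k ' ' = s[k] := List.getD_eq_getElem s ' ' hk
  cases cs with
  | nil =>
    simp only [spliceAux]
    rw [hget, List.drop_eq_getElem_cons hk]
  | cons c t =>
    have hc : k < c := hcs c (by simp)
    have e : c - k = (c - (k + 1)) + 1 := by omega
    simp only [spliceAux, List.drop_eq_getElem_cons hk, e, List.take_succ_cons, hget,
      List.cons_append]

lemma splice_eq (s : List Char) : ∀ (m : Nat), ∀ (k : Nat), k + m = s.length →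
    spliceAux s k ((List.range' (k + 1) (m - 1)).filter (fun i => bdry s i)) = tS s k m := by
  intro m
  induction m using Nat.strong_induction_on with
  | _ m ih =>
    intro k hkm
    match m with
    | 0 =>
      have : s.drop k = [] := by rw [List.drop_eq_nil_iff]; omega
      simp [spliceAux, tS, this]
    | 1 =>
      have hk : k < s.length := by omega
      have hd : s.drop (k + 1) = [] := by rw [List.drop_eq_nil_iff]; omega
      have hr : (List.range' (k + 1) (1 - 1)).filter (fun i => bdry s i) = [] := by simp
      rw [hr]
      show s.drop k = [s.getD k ' ']
      rw [List.getD_eq_getElem s ' ' hk, List.drop_eq_getElem_cons hk, hd]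
    | (m'' + 2) =>
      have hk : k < s.length := by omega
      have hget : s.getD k ' ' = s[k] := List.getD_eq_getElem s ' ' hk
      have hrange : List.range' (k + 1) (m'' + 2 - 1) = (k + 1) :: List.range' (k + 2) m'' := by
        simp [List.range'_succ]
      have hih : spliceAux s (k + 1) ((List.range' (k + 2) m'').filter (fun i => bdry s i))
          = tS s (k + 1) (m'' + 1) := by
        have := ih (m'' + 1) (by omega) (k + 1) (by omega)
        simpa using this
      rw [hrange]
      by_cases hb : bdry s (k + 1) = true
      · rw [List.filter_cons_of_pos hb]
        simp only [spliceAux]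
        rw [hih]
        have ht : List.take (k + 1 - k) (s.drop k) = [s[k]] := by
          rw [show k + 1 - k = 1 by omega, List.drop_eq_getElem_cons hk, List.take_succ_cons,
             List.take_zero]
        rw [ht]
        show _ = s.getD k ' ' :: eS s (k + 1) (m'' + 1)
        rw [eS_eq_tS, if_pos hb, hget]
        rfl
      · rw [List.filter_cons_of_neg (by simpa using hb)]
        rw [splice_peel s k hk _ (by
          intro c hc
          have := (List.mem_range'_1.mp (List.mem_of_mem_filter hc)).1
          omega)]
        rw [hih]
        show _ = s.getD k ' ' :: eS s (k + 1) (m'' + 1)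
        rw [eS_eq_tS, if_neg hb]
        rfl

lemma tS_zero_eq_eS (s : List Char) (n : Nat) : tS s 0 n = eS s 0 n := by
  cases n with
  | zero => rfl
  | succ n => simp [tS, eS, bdry]

-- ===== VERDICT (by name: the statement is the Claim_ definition above) =====
theorem camel_to_title_py_spec : Claim_equal_camel_to_title_py := by
  intro name _
  unfold Spec_camel_to_title_py camel_to_title_py camel_to_title_py_alt
  set s := name.toList with hs
  congr 1
  -- A side
  have hA : (s.foldl stepA ([], false)).1 = eS s 0 s.length := by
    have := A_fold s s.length 0 [] (by omega)
    simpa using this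
  -- B side
  rw [cuts_eq s]
  have h0 : ((0 : Nat) : Int) = (0 : Int) := rfl
  rw [← h0, B_fold s (cutsN s) [] 0]
  simp only [List.nil_append]
  rw [join_pieces s (cutsN s) 0]
  have hB : spliceAux s 0 (cutsN s) = tS s 0 s.length := by
    have := splice_eq s s.length 0 (by omega)
    simpa [cutsN] using this
  rw [hA, hB, tS_zero_eq_eS]
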